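-- pv_equiv track=rewrite | github.com/Cyber-Syntax/my-unicorn | src/utils/icon_paths.py | get_icon_path
-- ===== SOURCE A (Python) =====
-- from typing import Any, Dict, Optional
--
-- ICON_PATHS: Dict[str, Dict[str, str]] = {
--     "super-productivity": {
--         "exact_path": "src/assets/icons/favicon-192x192.png",
--         "filename": "superproductivity_icon.png",
--     },
--     "joplin": {
--         "exact_path": "Assets/LinuxIcons/256x256.png",
--         "filename": "joplin_icon.png",
--     },
--     "freetube": {
--         "exact_path": "_icons/icon.svg",
--         "filename": "freetube_icon.svg",
--     },
--     "appflowy": {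
--         "exact_path": "frontend/resources/flowy_icons/40x/app_logo.svg",
--         "filename": "appflowy_icon.svg",
--     },
--     "siyuan-note/siyuan": {
--         "exact_path": "app/src/assets/icon.png",
--         "filename": "siyuan_icon.png",
--     },
--     "zettlr": {
--         "exact_path": "resources/icons/png/512x512.png",
--         "filename": "zettlr_icon.png",
--     },
--     "app": {
--         "exact_path": "packages/clipper/images/icon128.png",
--         "filename": "standardnotes_icon.png",
--     },
--     "standardnotes/app": {
--         "exact_path": "packages/clipper/images/icon128.png",
--         "filename": "standardnotes_icon.png",
--     },
--     "pbek/qownnotes": {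
--         "exact_path": "icons/icon.png",
--         "filename": "qownnotes_icon.png",
--     },
--     # Add more repository configurations as needed...
-- }
--
-- def get_icon_path(repo_name: str) -> Optional[str]:
--     """Get the exact icon path for a repository.
--
--     Args:
--         repo_name: Repository name (case-insensitive)
--
--     Returns:
--         str or None: Exact path to the icon file or None if not configured
--     """
--     if not repo_name:
--         return None
--
--     # Normalize to lowercase for lookup
--     repo_lower = repo_name.lower()
--
--     # Direct lookup
--     if repo_lower in ICON_PATHS:
--         return ICON_PATHS[repo_lower].get("exact_path")
--
--     # Handle owner/repo format
--     if "/" in repo_lower: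
--         # Try with just the repo part (after the slash)
--         _, name = repo_lower.split("/", 1)
--         if name in ICON_PATHS:
--             return ICON_PATHS[name].get("exact_path")
--
--     # If repo_name doesn't have a slash, check if any key with a slash ends with this repo
--     else:
--         for key in ICON_PATHS:
--             if "/" in key and key.split("/", 1)[1] == repo_lower:
--                 return ICON_PATHS[key].get("exact_path")
--
--     return None
-- ===== SOURCE B (Python) =====
-- from typing import Dict, Optional
--
-- ICON_PATHS: Dict[str, Dict[str, str]] = {
--     "super-productivity": {
--         "exact_path": "src/assets/icons/favicon-192x192.png",
--         "filename": "superproductivity_icon.png",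
--     },
--     "joplin": {
--         "exact_path": "Assets/LinuxIcons/256x256.png",
--         "filename": "joplin_icon.png",
--     },
--     "freetube": {
--         "exact_path": "_icons/icon.svg",
--         "filename": "freetube_icon.svg",
--     },
--     "appflowy": {
--         "exact_path": "frontend/resources/flowy_icons/40x/app_logo.svg",
--         "filename": "appflowy_icon.svg",
--     },
--     "siyuan-note/siyuan": {
--         "exact_path": "app/src/assets/icon.png",
--         "filename": "siyuan_icon.png",
--     },
--     "zettlr": {
--         "exact_path": "resources/icons/png/512x512.png",
--         "filename": "zettlr_icon.png",
--     },
--     "app": {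
--         "exact_path": "packages/clipper/images/icon128.png",
--         "filename": "standardnotes_icon.png",
--     },
--     "standardnotes/app": {
--         "exact_path": "packages/clipper/images/icon128.png",
--         "filename": "standardnotes_icon.png",
--     },
--     "pbek/qownnotes": {
--         "exact_path": "icons/icon.png",
--         "filename": "qownnotes_icon.png",
--     },
-- }
--
-- # Flat index: key -> exact_path (None if a config has no "exact_path").
-- _PATH_INDEX: Dict[str, Optional[str]] = {
--     key: cfg.get("exact_path") for key, cfg in ICON_PATHS.items()
-- }
--
-- # Reverse index: suffix after "/" of each slash-containing key -> exact_path,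
-- # first insertion wins (mirrors the original first-match scan order).
-- _SUFFIX_INDEX: Dict[str, Optional[str]] = {}
-- for _key, _cfg in ICON_PATHS.items():
--     if "/" in _key:
--         _suffix = _key.split("/", 1)[1]
--         if _suffix not in _SUFFIX_INDEX:
--             _SUFFIX_INDEX[_suffix] = _cfg.get("exact_path")
--
--
-- def get_icon_path(repo_name: str) -> Optional[str]:
--     """Get the exact icon path for a repository (case-insensitive)."""
--     if not repo_name:
--         return None
--
--     repo_lower = repo_name.lower()
--
--     if repo_lower in _PATH_INDEX:
--         return _PATH_INDEX[repo_lower]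
--
--     if "/" in repo_lower:
--         return _PATH_INDEX.get(repo_lower.split("/", 1)[1])
--
--     return _SUFFIX_INDEX.get(repo_lower)
-- ===== Notes on version B (the rewrite author's own statement) =====
-- stated objective: idiomatic
-- what changed: B precomputes at module load a flat key->exact_path index and a first-insertion-wins suffix->exact_path reverse index over ICON_PATHS, so each call is plain dict lookups and A's per-call linear scan over all keys in the no-slash branch disappears.
import Mathlib
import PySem

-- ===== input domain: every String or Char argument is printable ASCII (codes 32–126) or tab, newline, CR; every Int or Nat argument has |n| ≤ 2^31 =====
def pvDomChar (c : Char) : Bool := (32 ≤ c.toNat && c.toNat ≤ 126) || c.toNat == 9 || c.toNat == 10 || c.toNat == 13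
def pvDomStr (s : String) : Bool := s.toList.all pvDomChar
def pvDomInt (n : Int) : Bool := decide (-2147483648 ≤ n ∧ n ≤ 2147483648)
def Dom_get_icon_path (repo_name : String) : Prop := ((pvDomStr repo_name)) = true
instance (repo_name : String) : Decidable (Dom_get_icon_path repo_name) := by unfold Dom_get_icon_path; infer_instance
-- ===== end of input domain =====

-- B replaces A's linear scan over ICON_PATHS keys by two dictionaries precomputed once
-- at module load (a flat key→exact_path index and a first-insertion-wins suffix→exact_path
-- reverse index), so every call is pure dictionary lookups (objective: idiomatic/faster lookups).

-- ===== PORT A =====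
-- the module constant ICON_PATHS (a Python dict literal with distinct keys)
def ICON_PATHS : PySem.Dict String (PySem.Dict String String) :=
  PySem.Dict.mk [
    ("super-productivity", PySem.Dict.mk [("exact_path", "src/assets/icons/favicon-192x192.png"), ("filename", "superproductivity_icon.png")]),
    ("joplin", PySem.Dict.mk [("exact_path", "Assets/LinuxIcons/256x256.png"), ("filename", "joplin_icon.png")]),
    ("freetube", PySem.Dict.mk [("exact_path", "_icons/icon.svg"), ("filename", "freetube_icon.svg")]),
    ("appflowy", PySem.Dict.mk [("exact_path", "frontend/resources/flowy_icons/40x/app_logo.svg"), ("filename", "appflowy_icon.svg")]),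
    ("siyuan-note/siyuan", PySem.Dict.mk [("exact_path", "app/src/assets/icon.png"), ("filename", "siyuan_icon.png")]),
    ("zettlr", PySem.Dict.mk [("exact_path", "resources/icons/png/512x512.png"), ("filename", "zettlr_icon.png")]),
    ("app", PySem.Dict.mk [("exact_path", "packages/clipper/images/icon128.png"), ("filename", "standardnotes_icon.png")]),
    ("standardnotes/app", PySem.Dict.mk [("exact_path", "packages/clipper/images/icon128.png"), ("filename", "standardnotes_icon.png")]),
    ("pbek/qownnotes", PySem.Dict.mk [("exact_path", "icons/icon.png"), ("filename", "qownnotes_icon.png")])]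

-- key.split("/", 1)[1] — the part after the first "/" (the indexing is guarded by '"/" in key')
def afterSlash (s : String) : String :=
  PySem.List.pyGetD ((PySem.Str.splitMax? s "/" 1).getD []) 1 ""

-- A's 'for key in ICON_PATHS: …' scan (falls through to the final 'return None')
def iconLoop (s : String) : List String → Option String
  | [] => none
  | key :: rest =>
    if PySem.Str.isIn "/" key && (afterSlash key == s) then
      ((PySem.Dict.get? ICON_PATHS key).getD PySem.Dict.empty).get? "exact_path"
    else iconLoop s rest

def get_icon_path (repo_name : String) : Option String :=
  if repo_name = "" then none
  else
    let repo_lower := PySem.Str.lower repo_name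
    if PySem.Dict.contains ICON_PATHS repo_lower then
      -- ICON_PATHS[repo_lower].get("exact_path"); the index is guarded by the contains test
      ((PySem.Dict.get? ICON_PATHS repo_lower).getD PySem.Dict.empty).get? "exact_path"
    else if PySem.Str.isIn "/" repo_lower then
      let name := afterSlash repo_lower
      if PySem.Dict.contains ICON_PATHS name then
        ((PySem.Dict.get? ICON_PATHS name).getD PySem.Dict.empty).get? "exact_path"
      else none
    else iconLoop repo_lower (PySem.Dict.keys ICON_PATHS)

-- ===== PORT B =====
-- _PATH_INDEX = {key: cfg.get("exact_path") for key, cfg in ICON_PATHS.items()}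
def PATH_INDEX : PySem.Dict String (Option String) :=
  PySem.Dict.ofList ((PySem.Dict.items ICON_PATHS).map (fun kv => (kv.1, PySem.Dict.get? kv.2 "exact_path")))

-- the module-load loop building _SUFFIX_INDEX (first insertion wins)
def SUFFIX_INDEX : PySem.Dict String (Option String) :=
  (PySem.Dict.items ICON_PATHS).foldl
    (fun d kv =>
      if PySem.Str.isIn "/" kv.1 then
        if PySem.Dict.contains d (afterSlash kv.1) then d
        else d.insert (afterSlash kv.1) (PySem.Dict.get? kv.2 "exact_path")
      else d)
    PySem.Dict.empty

def get_icon_path_alt (repo_name : String) : Option String :=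
  if repo_name = "" then none
  else
    let repo_lower := PySem.Str.lower repo_name
    if PySem.Dict.contains PATH_INDEX repo_lower then
      -- _PATH_INDEX[repo_lower]; the index is guarded by the contains test
      PySem.Dict.getD PATH_INDEX repo_lower none
    else if PySem.Str.isIn "/" repo_lower then
      PySem.Dict.getD PATH_INDEX (afterSlash repo_lower) none
    else PySem.Dict.getD SUFFIX_INDEX repo_lower none

-- ===== PRECONDITION & SPEC =====
def Spec_get_icon_path (repo_name : String) (out : Option String) : Prop := out = get_icon_path_alt repo_name
instance (repo_name : String) (out : Option String) : Decidable (Spec_get_icon_path repo_name out) := by unfold Spec_get_icon_path; infer_instance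

-- ===== CLAIM (what is proved, stated in full; the proofs are below) =====
def Claim_equal_get_icon_path : Prop := ∀ (repo_name : String), Dom_get_icon_path repo_name → Spec_get_icon_path repo_name (get_icon_path repo_name)

-- ===== LEMMAS AND PROOFS =====

-- PATH_INDEX evaluated to its literal
theorem PATH_INDEX_eq : PATH_INDEX = PySem.Dict.mk [
    ("super-productivity", some "src/assets/icons/favicon-192x192.png"),
    ("joplin", some "Assets/LinuxIcons/256x256.png"), ("freetube", some "_icons/icon.svg"),
    ("appflowy", some "frontend/resources/flowy_icons/40x/app_logo.svg"),
    ("siyuan-note/siyuan", some "app/src/assets/icon.png"),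
    ("zettlr", some "resources/icons/png/512x512.png"),
    ("app", some "packages/clipper/images/icon128.png"),
    ("standardnotes/app", some "packages/clipper/images/icon128.png"),
    ("pbek/qownnotes", some "icons/icon.png")] := by decide

-- SUFFIX_INDEX evaluated to its literal
theorem SUFFIX_INDEX_eq : SUFFIX_INDEX = PySem.Dict.mk [
    ("siyuan", some "app/src/assets/icon.png"),
    ("app", some "packages/clipper/images/icon128.png"),
    ("qownnotes", some "icons/icon.png")] := by decide

-- the two direct-lookup branches agree for every key
theorem direct_lookup_eq (s : String) :
    (if PySem.Dict.contains ICON_PATHS s then ((PySem.Dict.get? ICON_PATHS s).getD PySem.Dict.empty).get? "exact_path" else none)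
      = PySem.Dict.getD PATH_INDEX s none := by
  by_cases h1 : "super-productivity" = s; · subst h1; decide
  by_cases h2 : "joplin" = s; · subst h2; decide
  by_cases h3 : "freetube" = s; · subst h3; decide
  by_cases h4 : "appflowy" = s; · subst h4; decide
  by_cases h5 : "siyuan-note/siyuan" = s; · subst h5; decide
  by_cases h6 : "zettlr" = s; · subst h6; decide
  by_cases h7 : "app" = s; · subst h7; decide
  by_cases h8 : "standardnotes/app" = s; · subst h8; decide
  by_cases h9 : "pbek/qownnotes" = s; · subst h9; decide
  simp [ICON_PATHS, PATH_INDEX_eq, PySem.Dict.contains_mk,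
    PySem.Dict.getD_eq_get?_getD, PySem.Dict.get?, beq_iff_eq,
    h1, h2, h3, h4, h5, h6, h7, h8, h9]

-- ICON_PATHS and PATH_INDEX have the same keys
theorem contains_eq (s : String) :
    PySem.Dict.contains ICON_PATHS s = PySem.Dict.contains PATH_INDEX s := by
  simp [ICON_PATHS, PATH_INDEX_eq, PySem.Dict.contains_mk]

-- A's scan over ICON_PATHS keys equals B's suffix-index lookup
theorem loop_eq (s : String) :
    iconLoop s (PySem.Dict.keys ICON_PATHS) = PySem.Dict.getD SUFFIX_INDEX s none := by
  by_cases h1 : "siyuan" = s; · subst h1; decide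
  by_cases h2 : "app" = s; · subst h2; decide
  by_cases h3 : "qownnotes" = s; · subst h3; decide
  have k9 : PySem.Dict.keys ICON_PATHS = ["super-productivity", "joplin", "freetube", "appflowy",
      "siyuan-note/siyuan", "zettlr", "app", "standardnotes/app", "pbek/qownnotes"] := by decide
  have e1 : PySem.Str.isIn "/" "super-productivity" = false := by decide
  have e2 : PySem.Str.isIn "/" "joplin" = false := by decide
  have e3 : PySem.Str.isIn "/" "freetube" = false := by decide
  have e4 : PySem.Str.isIn "/" "appflowy" = false := by decide
  have e6 : PySem.Str.isIn "/" "zettlr" = false := by decide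
  have e7 : PySem.Str.isIn "/" "app" = false := by decide
  have t5 : PySem.Str.isIn "/" "siyuan-note/siyuan" = true := by decide
  have t8 : PySem.Str.isIn "/" "standardnotes/app" = true := by decide
  have t9 : PySem.Str.isIn "/" "pbek/qownnotes" = true := by decide
  have a5 : afterSlash "siyuan-note/siyuan" = "siyuan" := by decide
  have a8 : afterSlash "standardnotes/app" = "app" := by decide
  have a9 : afterSlash "pbek/qownnotes" = "qownnotes" := by decide
  simp only [iconLoop, k9, e1, e2, e3, e4, e6, e7, t5, t8, t9, a5, a8, a9,
    Bool.false_and, Bool.true_and, if_false, Bool.false_eq_true]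
  simp [SUFFIX_INDEX_eq, PySem.Dict.getD_eq_get?_getD, PySem.Dict.get?, beq_iff_eq, h1, h2, h3]

-- ===== VERDICT (by name: the statement is the Claim_ definition above) =====
theorem get_icon_path_spec : Claim_equal_get_icon_path := by
  intro repo_name _
  unfold Spec_get_icon_path get_icon_path get_icon_path_alt
  by_cases h0 : repo_name = ""
  · simp [h0]
  · simp only [if_neg h0]
    generalize PySem.Str.lower repo_name = s
    rw [← contains_eq]
    by_cases hc : PySem.Dict.contains ICON_PATHS s
    · simpa [hc] using direct_lookup_eq s
    · by_cases hs : PySem.Chars.isIn ['/'] s.toList = true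
      · simpa [hc, hs] using direct_lookup_eq (afterSlash s)
      · simpa [hc, hs] using loop_eq s
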